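-- pv_equiv track=rewrite | github.com/PolinaNik/MULTI_ARINC2 | program_files/modules.py | get_same
-- ===== SOURCE A (Python) =====
-- def get_same(lst1, lst2):
--     for i in range(len(lst2)):
--         line2 = lst2[i]
--         name2 = line2[0]
--         ind2 = line2[1]
--         for q in range(len(lst1)):
--             line = lst1[q]
--             name = line[0]
--             ind = line[2]
--             if name == name2 and ind == ind2:
--                 yield line
-- ===== SOURCE B (Python) =====
-- def get_same(lst1, lst2):
--     index = {}
--     for line in lst1:
--         index.setdefault((line[0], line[2]), []).append(line)
--     for line2 in lst2:
--         yield from index.get((line2[0], line2[1]), ())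
-- ===== Notes on version B (the rewrite author's own statement) =====
-- stated objective: alternative
-- what changed: B builds a dict from lst1 keyed by (name, index-field) to the ordered list of matching lines once, then does one lookup per lst2 element, replacing A's inner scan of lst1 per lst2 row.
-- outside the precondition, e.g. on get_same([['x']], []): A returns [], B raises IndexError
import Mathlib
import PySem

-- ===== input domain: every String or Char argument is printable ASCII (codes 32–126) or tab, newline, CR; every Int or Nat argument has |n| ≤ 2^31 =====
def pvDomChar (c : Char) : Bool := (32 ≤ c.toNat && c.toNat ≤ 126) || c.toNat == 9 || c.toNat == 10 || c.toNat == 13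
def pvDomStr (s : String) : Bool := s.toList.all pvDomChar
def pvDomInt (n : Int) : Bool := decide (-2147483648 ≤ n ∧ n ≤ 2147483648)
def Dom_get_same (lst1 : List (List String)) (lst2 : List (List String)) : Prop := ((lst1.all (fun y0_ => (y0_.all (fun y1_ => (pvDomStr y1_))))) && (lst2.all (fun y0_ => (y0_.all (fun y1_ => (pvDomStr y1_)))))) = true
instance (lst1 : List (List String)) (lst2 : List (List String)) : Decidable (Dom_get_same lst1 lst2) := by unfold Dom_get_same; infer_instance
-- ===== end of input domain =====

-- B replaces A's nested scan by a dict keyed by (name, index-field) built once over lst1, then one lookup per lst2 row (alternative algorithm).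


-- ===== PORT A =====
-- literal port of A: outer loop over lst2, inner loop over lst1, append matching lines
def get_same (lst1 : List (List String)) (lst2 : List (List String)) : List (List String) :=
  lst2.foldl (fun acc line2 =>
    let name2 := (PySem.List.pyGet? line2 0).getD ""
    let ind2  := (PySem.List.pyGet? line2 1).getD ""
    lst1.foldl (fun acc2 line =>
      let name := (PySem.List.pyGet? line 0).getD ""
      let ind  := (PySem.List.pyGet? line 2).getD ""
      if name = name2 ∧ ind = ind2 then acc2 ++ [line] else acc2) acc) []

-- ===== PORT B =====
-- port of Source B: build the index dict over lst1, then one lookup per lst2 row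
def get_same_alt (lst1 : List (List String)) (lst2 : List (List String)) : List (List String) :=
  let idx : PySem.Dict (String × String) (List (List String)) :=
    lst1.foldl (fun d line =>
      let k := ((PySem.List.pyGet? line 0).getD "", (PySem.List.pyGet? line 2).getD "")
      d.insert k (d.getD k [] ++ [line])) PySem.Dict.empty
  lst2.foldl (fun acc line2 =>
    acc ++ idx.getD ((PySem.List.pyGet? line2 0).getD "", (PySem.List.pyGet? line2 1).getD "") []) []

-- ===== PRECONDITION & SPEC =====
-- Pre_ excludes inputs with too-short rows (lst2 rows < 2 or lst1 rows < 3 fields): A raises IndexError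
-- on all of them except the degenerate case lst2 = [], where A returns [] without touching lst1 but B's
-- eager index build raises.
def Pre_get_same (lst1 : List (List String)) (lst2 : List (List String)) : Prop :=
  (∀ l ∈ lst1, 3 ≤ l.length) ∧ (∀ l ∈ lst2, 2 ≤ l.length)
instance (lst1 : List (List String)) (lst2 : List (List String)) : Decidable (Pre_get_same lst1 lst2) := by unfold Pre_get_same; infer_instance
def pvWitness_get_same : List (List String) × List (List String) :=
  ([["a", "x", "1"], ["b", "y", "2"]], [["a", "1"], ["c", "2"]])
def Spec_get_same (lst1 : List (List String)) (lst2 : List (List String)) (out : List (List String)) : Prop := out = get_same_alt lst1 lst2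
instance (lst1 : List (List String)) (lst2 : List (List String)) (out : List (List String)) : Decidable (Spec_get_same lst1 lst2 out) := by unfold Spec_get_same; infer_instance

-- ===== CLAIM (what is proved, stated in full; the proofs are below) =====
def Claim_equal_get_same : Prop := ∀ (lst1 : List (List String)) (lst2 : List (List String)), Dom_get_same lst1 lst2 → Pre_get_same lst1 lst2 → Spec_get_same lst1 lst2 (get_same lst1 lst2)

-- ===== LEMMAS AND PROOFS =====

-- the key of an lst1 line, as both programs compute it
def pvKey (line : List String) : String × String :=
  ((PySem.List.pyGet? line 0).getD "", (PySem.List.pyGet? line 2).getD "")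

-- the index dict built by B's first loop maps each key to the lst1 lines with that key, in order
theorem pvIdx_getD (lst1 : List (List String)) (d : PySem.Dict (String × String) (List (List String))) (k : String × String) :
    (lst1.foldl (fun d line => d.insert (pvKey line) (d.getD (pvKey line) [] ++ [line])) d).getD k []
      = d.getD k [] ++ lst1.filter (fun line => pvKey line = k) := by
  induction lst1 generalizing d with
  | nil => simp
  | cons l t ih =>
    simp only [List.foldl_cons, List.filter_cons, ih, PySem.Dict.getD_insert]
    by_cases h : pvKey l = k
    · simp [h]
    · simp [h, Ne.symm h]

theorem get_same_eq (lst1 lst2 : List (List String)) :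
    get_same lst1 lst2 = get_same_alt lst1 lst2 := by
  unfold get_same get_same_alt
  induction lst2 using List.reverseRecOn with
  | nil => simp
  | append_singleton t line2 ih =>
    simp only [List.foldl_append, List.foldl_cons, List.foldl_nil, ih]
    rw [PySem.List.foldl_append_ite_eq_filter]
    have hl : (fun (d : PySem.Dict (String × String) (List (List String))) (line : List String) =>
          d.insert ((PySem.List.pyGet? line 0).getD "", (PySem.List.pyGet? line 2).getD "")
            (d.getD ((PySem.List.pyGet? line 0).getD "", (PySem.List.pyGet? line 2).getD "") [] ++ [line]))
        = (fun d line => d.insert (pvKey line) (d.getD (pvKey line) [] ++ [line])) := rfl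
    rw [hl, pvIdx_getD]
    simp only [PySem.Dict.getD_empty, List.nil_append]
    congr 1
    exact List.filter_congr (fun x _ => by simp [pvKey, Prod.ext_iff])

-- ===== VERDICT (by name: the statement is the Claim_ definition above) =====
theorem get_same_spec : Claim_equal_get_same := by
  intro lst1 lst2 _ _
  exact get_same_eq lst1 lst2
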